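-- pv_equiv track=rewrite | github.com/learn-ukrainian/learn-ukrainian.github.io | scripts/wiki/diagnostics/retrieval_playback.py | summarize_counts
-- ===== SOURCE A (Python) =====
-- from typing import Any, TypedDict
--
-- def summarize_counts(concepts: dict[str, dict[str, Any]]) -> tuple[int, int, int]:
--     returned_present = sum(
--         1 for result in concepts.values() if result["present_in_returned_41"]
--     )
--     absent_returned_but_present_corpus = sum(
--         1
--         for result in concepts.values()
--         if not result["present_in_returned_41"] and result["present_in_full_corpus"]
--     )
--     absent_corpus = sum(
--         1 for result in concepts.values() if not result["present_in_full_corpus"]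
--     )
--     return returned_present, absent_returned_but_present_corpus, absent_corpus
-- ===== SOURCE B (Python) =====
-- def summarize_counts(concepts):
--     returned_present = 0
--     absent_returned_but_present_corpus = 0
--     absent_corpus = 0
--     for result in concepts.values():
--         r = result["present_in_returned_41"]
--         f = result["present_in_full_corpus"]
--         if r:
--             returned_present += 1
--         elif f:
--             absent_returned_but_present_corpus += 1
--         if not f:
--             absent_corpus += 1
--     return returned_present, absent_returned_but_present_corpus, absent_corpus
-- ===== Notes on version B (the rewrite author's own statement) =====
-- stated objective: simpler
-- what changed: replaces A's three separate generator passes over concepts.values() with a single loop maintaining three counters (reading each flag once per concept)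
-- outside the precondition, e.g. on summarize_counts({'x': {'present_in_returned_41': True}}): A raises KeyError, B raises KeyError
import Mathlib
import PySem

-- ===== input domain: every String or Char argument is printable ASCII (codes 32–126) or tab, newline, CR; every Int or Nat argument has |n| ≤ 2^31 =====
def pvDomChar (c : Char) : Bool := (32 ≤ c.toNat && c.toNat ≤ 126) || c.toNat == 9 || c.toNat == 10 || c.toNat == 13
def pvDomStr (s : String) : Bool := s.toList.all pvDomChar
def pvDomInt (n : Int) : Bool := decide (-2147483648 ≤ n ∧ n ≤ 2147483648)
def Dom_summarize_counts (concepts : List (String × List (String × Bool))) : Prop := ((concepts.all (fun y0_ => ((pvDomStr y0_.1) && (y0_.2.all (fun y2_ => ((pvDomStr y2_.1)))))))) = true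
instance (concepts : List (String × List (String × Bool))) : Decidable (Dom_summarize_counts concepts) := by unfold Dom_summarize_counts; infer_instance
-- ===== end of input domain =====

-- B replaces A's three generator passes over the values with one loop carrying three counters (objective: simpler).

-- d[k] for an inner dict, total form: Pre_ guarantees the key is present (first-match lookup).
def pvGetFlag (d : List (String × Bool)) (k : String) : Bool := (d.lookup k).getD false

-- ===== PORT A =====
def summarize_counts (concepts : List (String × List (String × Bool))) : Int × Int × Int :=
  let vals := concepts.map Prod.snd
  let returned_present : Int :=
    vals.foldl (fun acc result => if pvGetFlag result "present_in_returned_41" then acc + 1 else acc) 0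
  let absent_returned_but_present_corpus : Int :=
    vals.foldl (fun acc result =>
      if !pvGetFlag result "present_in_returned_41" && pvGetFlag result "present_in_full_corpus"
      then acc + 1 else acc) 0
  let absent_corpus : Int :=
    vals.foldl (fun acc result => if !pvGetFlag result "present_in_full_corpus" then acc + 1 else acc) 0
  (returned_present, absent_returned_but_present_corpus, absent_corpus)

-- ===== PORT B =====
def summarize_counts_alt (concepts : List (String × List (String × Bool))) : Int × Int × Int :=
  concepts.foldl (fun (acc : Int × Int × Int) p =>
    let r := pvGetFlag p.2 "present_in_returned_41"
    let f := pvGetFlag p.2 "present_in_full_corpus"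
    ( (if r then acc.1 + 1 else acc.1)
    , (if !r && f then acc.2.1 + 1 else acc.2.1)
    , (if !f then acc.2.2 + 1 else acc.2.2) )) (0, 0, 0)

-- ===== PRECONDITION & SPEC =====
-- Pre_ excludes inner dicts missing either flag key (Python raises KeyError there) and association
-- lists with duplicate keys, which no Python dict input can produce (the first-match convention
-- would be accidental there).
def Pre_summarize_counts (concepts : List (String × List (String × Bool))) : Prop :=
  (concepts.map Prod.fst).Nodup ∧
  ∀ p ∈ concepts, (p.2.map Prod.fst).Nodup ∧
    (p.2.lookup "present_in_returned_41").isSome = true ∧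
    (p.2.lookup "present_in_full_corpus").isSome = true
instance (concepts : List (String × List (String × Bool))) : Decidable (Pre_summarize_counts concepts) := by unfold Pre_summarize_counts; infer_instance

def pvWitness_summarize_counts : (List (String × List (String × Bool))) :=
  [("cat", [("present_in_returned_41", true), ("present_in_full_corpus", true)]),
   ("dog", [("present_in_returned_41", false), ("present_in_full_corpus", false)])]

def Spec_summarize_counts (concepts : List (String × List (String × Bool))) (out : Int × Int × Int) : Prop := out = summarize_counts_alt concepts
instance (concepts : List (String × List (String × Bool))) (out : Int × Int × Int) : Decidable (Spec_summarize_counts concepts out) := by unfold Spec_summarize_counts; infer_instance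

-- ===== CLAIM (what is proved, stated in full; the proofs are below) =====
def Claim_equal_summarize_counts : Prop := ∀ (concepts : List (String × List (String × Bool))), Dom_summarize_counts concepts → Pre_summarize_counts concepts → Spec_summarize_counts concepts (summarize_counts concepts)

-- ===== LEMMAS AND PROOFS =====

-- B's single fold carrying three counters equals the triple of A's three folds.
theorem fold_split (l : List (String × List (String × Bool))) (a b c : Int) :
    l.foldl (fun (acc : Int × Int × Int) p =>
      let r := pvGetFlag p.2 "present_in_returned_41"
      let f := pvGetFlag p.2 "present_in_full_corpus"
      ( (if r then acc.1 + 1 else acc.1)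
      , (if !r && f then acc.2.1 + 1 else acc.2.1)
      , (if !f then acc.2.2 + 1 else acc.2.2) )) (a, b, c)
    = ( l.foldl (fun acc p => if pvGetFlag p.2 "present_in_returned_41" then acc + 1 else acc) a
      , l.foldl (fun acc p =>
          if !pvGetFlag p.2 "present_in_returned_41" && pvGetFlag p.2 "present_in_full_corpus"
          then acc + 1 else acc) b
      , l.foldl (fun acc p => if !pvGetFlag p.2 "present_in_full_corpus" then acc + 1 else acc) c ) := by
  induction l generalizing a b c with
  | nil => rfl
  | cons x xs ih => simp only [List.foldl_cons]; exact ih _ _ _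

-- ===== VERDICT (by name: the statement is the Claim_ definition above) =====
theorem summarize_counts_spec : Claim_equal_summarize_counts := by
  intro concepts _ _
  unfold Spec_summarize_counts summarize_counts summarize_counts_alt
  rw [fold_split]
  simp [List.foldl_map]
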